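-- pv_equiv track=rewrite | github.com/EMAT31530/ai-group-project-group-2 | next_word_entrop.py | yellow_letter
-- ===== SOURCE A (Python) =====
-- def yellow_letter(possible_words, yellow_letters):
--     yellows = len(yellow_letters) - 1
--     dup_list = []
--     for char in yellow_letters:
--         for word in possible_words:
--             if char in word:
--                 dup_list.append(word)
--
--     dup = {x for x in dup_list if dup_list.count(x) > yellows}
--
--     possible_words = dup
--
--     return possible_words
-- ===== SOURCE B (Python) =====
-- def yellow_letter(possible_words, yellow_letters):
--     if not yellow_letters:
--         return set()
--     candidate_sets = [{word for word in possible_words if char in word} for char in yellow_letters]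
--     result = candidate_sets[0]
--     for s in candidate_sets[1:]:
--         result = result & s
--     return result
-- ===== Notes on version B (the rewrite author's own statement) =====
-- stated objective: idiomatic
-- what changed: A builds a flat occurrence list over letters x words and keeps words whose quadratic list.count exceeds len(yellow_letters)-1; B builds one candidate set per yellow letter and intersects them, so the duplicated list and the repeated counting pass disappear.
-- intended difference: On lists where some word w is duplicated often enough that copies(w) x (matching letters in w) reaches len(yellow_letters) while w misses some yellow letter, A returns a set containing w but B omits it; B's is intended because w does not contain all the yellow letters. — e.g. on yellow_letter(["ab", "ab"], "ac"): A returns ["ab"], B returns []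
import Mathlib
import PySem

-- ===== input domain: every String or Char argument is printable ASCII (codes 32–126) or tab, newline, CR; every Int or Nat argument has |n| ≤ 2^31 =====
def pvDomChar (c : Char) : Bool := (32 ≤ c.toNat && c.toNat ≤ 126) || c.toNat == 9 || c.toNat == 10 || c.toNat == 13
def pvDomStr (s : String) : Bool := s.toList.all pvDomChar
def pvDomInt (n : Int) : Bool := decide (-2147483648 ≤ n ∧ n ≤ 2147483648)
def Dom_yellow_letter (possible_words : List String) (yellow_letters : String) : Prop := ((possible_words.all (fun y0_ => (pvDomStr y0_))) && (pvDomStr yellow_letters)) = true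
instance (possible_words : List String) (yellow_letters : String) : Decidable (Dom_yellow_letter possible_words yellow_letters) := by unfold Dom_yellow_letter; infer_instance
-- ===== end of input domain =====

-- B replaces A's duplicated-occurrence list and quadratic count threshold by per-letter
-- candidate sets intersected once (idiomatic & faster); on lists with duplicate words A's
-- count threshold admits words missing letters — see D_yellow_letter below.

-- ===== PORT A =====
-- 'char in word' for a single character: PySem.Chars.isIn of the one-char substring (exact)
def pvHasChar (char : Char) (word : String) : Bool := PySem.Chars.isIn [char] word.toList

def yellow_letter (possible_words : List String) (yellow_letters : String) : List String :=
  let yellows : Int := (PySem.Str.len yellow_letters : Int) - 1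
  let dup_list : List String :=
    yellow_letters.toList.foldl (fun acc char =>
      possible_words.foldl (fun acc word =>
        if pvHasChar char word then acc ++ [word] else acc) acc) []
  PySem.Set.ofList (dup_list.filter (fun x => (dup_list.count x : Int) > yellows))

-- ===== PORT B =====
def yellow_letter_alt (possible_words : List String) (yellow_letters : String) : List String :=
  if yellow_letters.toList.isEmpty then []
  else
    let candidate_sets : List (PySem.Set String) :=
      yellow_letters.toList.map (fun char =>
        PySem.Set.ofList (possible_words.filter (fun word => pvHasChar char word)))
    (candidate_sets.drop 1).foldl (fun result s => PySem.Set.inter result s) (candidate_sets.headD [])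

-- ===== PRECONDITION & SPEC =====
-- When possible_words contains a word w duplicated enough that (copies of w) × (yellow letters in w)
-- reaches len(yellow_letters) while w misses some yellow letter, A returns a set containing w,
-- B returns the set without it; B's is intended (w does not contain all the yellow letters).
def D_yellow_letter (possible_words : List String) (yellow_letters : String) : Prop :=
  ∃ w ∈ possible_words,
    yellow_letters.toList.countP (fun c => pvHasChar c w) < yellow_letters.toList.length ∧
    yellow_letters.toList.length ≤
      possible_words.count w * yellow_letters.toList.countP (fun c => pvHasChar c w)
instance (possible_words : List String) (yellow_letters : String) : Decidable (D_yellow_letter possible_words yellow_letters) := by unfold D_yellow_letter; infer_instance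

def Spec_yellow_letter (possible_words : List String) (yellow_letters : String) (out : List String) : Prop := ¬ D_yellow_letter possible_words yellow_letters → out = yellow_letter_alt possible_words yellow_letters
instance (possible_words : List String) (yellow_letters : String) (out : List String) : Decidable (Spec_yellow_letter possible_words yellow_letters out) := by unfold Spec_yellow_letter; infer_instance

def pvDiffWitness_yellow_letter : List String × String := (["ab", "ab"], "ac")
def pvDiffWitnessOut_yellow_letter : (List String) × (List String) := (["ab"], [])

-- ===== CLAIM (what is proved, stated in full; the proofs are below) =====
def Claim_unchanged_yellow_letter : Prop := ∀ (possible_words : List String) (yellow_letters : String), Dom_yellow_letter possible_words yellow_letters → Spec_yellow_letter possible_words yellow_letters (yellow_letter possible_words yellow_letters)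
def Claim_changed_yellow_letter : Prop := Dom_yellow_letter (pvDiffWitness_yellow_letter.1) (pvDiffWitness_yellow_letter.2) ∧ D_yellow_letter (pvDiffWitness_yellow_letter.1) (pvDiffWitness_yellow_letter.2) ∧ yellow_letter (pvDiffWitness_yellow_letter.1) (pvDiffWitness_yellow_letter.2) = pvDiffWitnessOut_yellow_letter.1 ∧ yellow_letter_alt (pvDiffWitness_yellow_letter.1) (pvDiffWitness_yellow_letter.2) = pvDiffWitnessOut_yellow_letter.2 ∧ pvDiffWitnessOut_yellow_letter.1 ≠ pvDiffWitnessOut_yellow_letter.2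
def Claim_exact_yellow_letter : Prop := ∀ (possible_words : List String) (yellow_letters : String), Dom_yellow_letter possible_words yellow_letters → D_yellow_letter possible_words yellow_letters → yellow_letter possible_words yellow_letters ≠ yellow_letter_alt possible_words yellow_letters

-- ===== LEMMAS AND PROOFS =====

-- A's nested loop builds, for each yellow letter, the block of words containing it
theorem pv_dupList_eq (possible_words : List String) (l : List Char) (acc : List String) :
    l.foldl (fun acc char =>
      possible_words.foldl (fun acc word =>
        if pvHasChar char word then acc ++ [word] else acc) acc) acc
    = acc ++ l.flatMap (fun c => possible_words.filter (fun w => pvHasChar c w)) := by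
  simp only [PySem.List.foldl_append_if_eq_filter, PySem.List.foldl_append_eq_flatMap]

-- each word occurs in dup_list (matching letters) × (copies in possible_words) times
theorem pv_count_flatMap (possible_words : List String) (l : List Char) (x : String) :
    (l.flatMap (fun c => possible_words.filter (fun w => pvHasChar c w))).count x
    = l.countP (fun c => pvHasChar c x) * possible_words.count x := by
  induction l with
  | nil => simp
  | cons c rest ih =>
    simp only [List.flatMap_cons, List.count_append, List.countP_cons, ih]
    cases hc : pvHasChar c x with
    | true =>
      rw [List.count_filter hc]
      simp [Nat.add_mul, Nat.add_comm]
    | false =>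
      have : (possible_words.filter (fun w => pvHasChar c w)).count x = 0 := by
        rw [List.count_eq_zero]
        intro hmem
        rw [List.mem_filter] at hmem
        simp [hc] at hmem
      simp [this]

-- ordered dedup commutes with filter
theorem pv_ofList_filter {α : Type} [BEq α] [LawfulBEq α] (b : α → Bool) (xs : List α) :
    (PySem.Set.ofList xs).filter b = PySem.Set.ofList (xs.filter b) := by
  induction xs using List.reverseRecOn with
  | nil => rfl
  | append_singleton xs x ih =>
    cases hbx : b x with
    | false =>
      have hr : List.filter b (xs ++ [x]) = List.filter b xs := by simp [hbx]
      rw [hr, PySem.Set.ofList_append_singleton, PySem.Set.add_eq_ite]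
      split_ifs with hmem
      · exact ih
      · rw [List.filter_append]
        simp [hbx, ih]
    | true =>
      have hr : List.filter b (xs ++ [x]) = List.filter b xs ++ [x] := by simp [hbx]
      rw [hr, PySem.Set.ofList_append_singleton, PySem.Set.add_eq_ite,
        PySem.Set.ofList_append_singleton, PySem.Set.add_eq_ite]
      by_cases hmem : x ∈ PySem.Set.ofList xs
      · have hx2 : x ∈ PySem.Set.ofList (List.filter b xs) :=
          (PySem.Set.mem_ofList _ _).mpr
            (List.mem_filter.mpr ⟨(PySem.Set.mem_ofList _ _).mp hmem, hbx⟩)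
        simp only [hmem, if_true, hx2, ih]
      · have hx2 : x ∉ PySem.Set.ofList (List.filter b xs) := by
          intro hx
          exact hmem ((PySem.Set.mem_ofList _ _).mpr
            (List.mem_filter.mp ((PySem.Set.mem_ofList _ _).mp hx)).1)
        simp only [hmem, if_false, hx2, List.filter_append]
        simp [hbx, ih]

-- appending elements already present does not change the set
theorem pv_ofList_append_of_subset {α : Type} [BEq α] [LawfulBEq α] (l₁ l₂ : List α)
    (h : ∀ x ∈ l₂, x ∈ l₁) :
    PySem.Set.ofList (l₁ ++ l₂) = PySem.Set.ofList l₁ := by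
  have hnil : (PySem.Set.ofList l₂).filter (fun y => !(PySem.Set.contains (PySem.Set.ofList l₁) y)) = [] := by
    rw [List.filter_eq_nil_iff]
    intro y hy
    have hyl : y ∈ l₁ := h y ((PySem.Set.mem_ofList _ _).mp hy)
    have hc : PySem.Set.contains (PySem.Set.ofList l₁) y = true :=
      (PySem.Set.contains_iff _ _).mpr ((PySem.Set.mem_ofList _ _).mpr hyl)
    simpa using hyl
  rw [PySem.Set.ofList_append, PySem.Set.update_eq_append_filter, hnil, List.append_nil]

-- the intersection loop of B computes the all-letters filter
theorem pv_foldl_inter (possible_words : List String) (rest : List Char) (p : String → Bool) :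
    (rest.map (fun char =>
        PySem.Set.ofList (possible_words.filter (fun word => pvHasChar char word)))).foldl
      (fun result s => PySem.Set.inter result s)
      (PySem.Set.ofList (possible_words.filter p))
    = PySem.Set.ofList (possible_words.filter
        (fun w => p w && rest.all (fun c => pvHasChar c w))) := by
  induction rest generalizing p with
  | nil => simp
  | cons c rest' ih =>
    simp only [List.map_cons, List.foldl_cons]
    have hstep : PySem.Set.inter (PySem.Set.ofList (possible_words.filter p))
        (PySem.Set.ofList (possible_words.filter (fun word => pvHasChar c word)))
        = PySem.Set.ofList (possible_words.filter (fun w => p w && pvHasChar c w)) := by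
      show (PySem.Set.ofList (possible_words.filter p)).filter _ = _
      have hcong : (PySem.Set.ofList (possible_words.filter p)).filter
          (fun x => PySem.Set.contains (PySem.Set.ofList (possible_words.filter (fun word => pvHasChar c word))) x)
          = (PySem.Set.ofList (possible_words.filter p)).filter (fun x => pvHasChar c x) := by
        apply List.filter_congr
        intro x hx
        have hxpw : x ∈ possible_words := (List.mem_filter.mp ((PySem.Set.mem_ofList _ _).mp hx)).1
        rw [Bool.eq_iff_iff, PySem.Set.contains_iff, PySem.Set.mem_ofList, List.mem_filter]
        constructor
        · rintro ⟨_, h2⟩; exact h2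
        · intro h2; exact ⟨hxpw, h2⟩
      rw [hcong, pv_ofList_filter, List.filter_filter]
      congr 1
      apply List.filter_congr
      intro w _
      simp [Bool.and_comm]
    rw [hstep, ih]
    congr 1
    apply List.filter_congr
    intro w _
    simp [Bool.and_assoc]

-- a word qualifies under B's test iff every yellow letter counts as matching
theorem pv_all_iff_countP (l : List Char) (w : String) :
    (l.all (fun c => pvHasChar c w) = true) ↔ l.countP (fun c => pvHasChar c w) = l.length := by
  rw [List.all_eq_true, List.countP_eq_length]

-- outside D_, A's count threshold is exactly the all-letters test (on words of dup_list)
theorem pv_filter_cond (possible_words : List String) (l : List Char)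
    (hND : ∀ w ∈ possible_words,
      ¬(l.countP (fun c => pvHasChar c w) < l.length ∧
        l.length ≤ possible_words.count w * l.countP (fun c => pvHasChar c w)))
    (x : String) (hx : x ∈ l.flatMap (fun c => possible_words.filter (fun w => pvHasChar c w))) :
    (decide ((((l.flatMap (fun c => possible_words.filter (fun w => pvHasChar c w))).count x : Int)) > (l.length : Int) - 1))
      = l.all (fun c => pvHasChar c x) := by
  rcases List.mem_flatMap.mp hx with ⟨c, hc, hxf⟩
  rcases List.mem_filter.mp hxf with ⟨hxpw, _⟩
  have hk : 1 ≤ possible_words.count x := List.count_pos_iff.mpr hxpw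
  have hm_le : l.countP (fun c => pvHasChar c x) ≤ l.length := List.countP_le_length
  have hcount := pv_count_flatMap possible_words l x
  rw [Bool.eq_iff_iff, decide_eq_true_iff, pv_all_iff_countP, hcount]
  have hnd := hND x hxpw
  constructor
  · intro hgt
    have : l.length ≤ l.countP (fun c => pvHasChar c x) * possible_words.count x := by omega
    by_contra hne
    exact hnd ⟨by omega, by rw [Nat.mul_comm] at this; omega⟩
  · intro heq
    have : l.length ≤ l.countP (fun c => pvHasChar c x) * possible_words.count x :=
      heq ▸ Nat.le_mul_of_pos_right _ hk
    omega

-- A's result outside D_ is the deduped all-letters filter, in possible_words order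
theorem pv_A_eq (possible_words : List String) (yellow_letters : String)
    (hND : ¬ D_yellow_letter possible_words yellow_letters) :
    yellow_letter possible_words yellow_letters
    = if yellow_letters.toList.isEmpty then []
      else PySem.Set.ofList (possible_words.filter
        (fun w => yellow_letters.toList.all (fun c => pvHasChar c w))) := by
  unfold yellow_letter
  have hND' : ∀ w ∈ possible_words,
      ¬(yellow_letters.toList.countP (fun c => pvHasChar c w) < yellow_letters.toList.length ∧
        yellow_letters.toList.length ≤
          possible_words.count w * yellow_letters.toList.countP (fun c => pvHasChar c w)) :=
    fun w hw hAnd => hND ⟨w, hw, hAnd⟩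
  set l := yellow_letters.toList with hl
  simp only [pv_dupList_eq, List.nil_append, PySem.Str.len_eq, ← hl]
  rw [List.filter_congr (fun x hx => pv_filter_cond possible_words l hND' x hx)]
  cases l with
  | nil => simp
  | cons c0 rest =>
    simp only [List.isEmpty_cons, Bool.false_eq_true, if_false]
    rw [List.filter_flatMap, List.flatMap_cons, List.filter_filter]
    have h1 : (possible_words.filter (fun w => ((c0 :: rest).all (fun c => pvHasChar c w)) && pvHasChar c0 w))
        = possible_words.filter (fun w => (c0 :: rest).all (fun c => pvHasChar c w)) := by
      apply List.filter_congr
      intro w _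
      cases hq : (c0 :: rest).all (fun c => pvHasChar c w) with
      | true =>
        have := (List.all_eq_true.mp hq) c0 (List.mem_cons_self)
        simp [this]
      | false => simp
    rw [h1]
    apply pv_ofList_append_of_subset
    intro x hx
    rcases List.mem_flatMap.mp hx with ⟨c, _, hxf⟩
    rcases List.mem_filter.mp hxf with ⟨hxf2, hq⟩
    rcases List.mem_filter.mp hxf2 with ⟨hxpw, _⟩
    exact List.mem_filter.mpr ⟨hxpw, hq⟩

-- B's result is the same deduped all-letters filter (for nonempty yellow_letters)
theorem pv_B_eq (possible_words : List String) (yellow_letters : String) :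
    yellow_letter_alt possible_words yellow_letters
    = if yellow_letters.toList.isEmpty then []
      else PySem.Set.ofList (possible_words.filter
        (fun w => yellow_letters.toList.all (fun c => pvHasChar c w))) := by
  unfold yellow_letter_alt
  cases hl : yellow_letters.toList with
  | nil => simp
  | cons c0 rest =>
    simp only [List.isEmpty_cons, Bool.false_eq_true, if_false, List.map_cons, List.drop_succ_cons,
      List.drop_zero, List.headD_cons]
    rw [pv_foldl_inter possible_words rest (fun word => pvHasChar c0 word)]
    exact congrArg _ (List.filter_congr (fun w _ => by simp))

-- ===== VERDICT (by name: the statement is the Claim_ definition above) =====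
theorem yellow_letter_spec : Claim_unchanged_yellow_letter := by
  intro possible_words yellow_letters _ hND
  show yellow_letter possible_words yellow_letters = yellow_letter_alt possible_words yellow_letters
  rw [pv_A_eq possible_words yellow_letters hND, pv_B_eq]

theorem yellow_letter_changed : Claim_changed_yellow_letter := by
  unfold Claim_changed_yellow_letter; decide

theorem yellow_letter_tight : Claim_exact_yellow_letter := by
  intro possible_words yellow_letters _ hD
  rcases hD with ⟨w, hwpw, hm, hkm⟩
  set l := yellow_letters.toList with hl
  have hm1 : 1 ≤ l.countP (fun c => pvHasChar c w) := by
    by_contra h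
    have : l.countP (fun c => pvHasChar c w) = 0 := by omega
    rw [this] at hkm
    omega
  intro heq
  -- w is in A's result
  have hwA : w ∈ yellow_letter possible_words yellow_letters := by
    unfold yellow_letter
    simp only [pv_dupList_eq, List.nil_append, PySem.Str.len_eq, ← hl]
    rw [PySem.Set.mem_ofList, List.mem_filter]
    rcases List.countP_pos_iff.mp (by omega : 0 < l.countP (fun c => pvHasChar c w)) with ⟨c, hc, hpc⟩
    refine ⟨List.mem_flatMap.mpr ⟨c, hc, List.mem_filter.mpr ⟨hwpw, hpc⟩⟩, ?_⟩
    rw [decide_eq_true_iff, pv_count_flatMap]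
    have : (l.length : Int) ≤ (l.countP (fun c => pvHasChar c w) * possible_words.count w : Nat) := by
      rw [Nat.mul_comm] at hkm
      exact_mod_cast hkm
    omega
  -- w is not in B's result
  have hwB : w ∉ yellow_letter_alt possible_words yellow_letters := by
    rw [pv_B_eq]
    cases hle : yellow_letters.toList with
    | nil => simp
    | cons c0 rest =>
      simp only [List.isEmpty_cons, Bool.false_eq_true, if_false]
      rw [PySem.Set.mem_ofList, List.mem_filter]
      rintro ⟨_, hall⟩
      rw [← hle, ← hl] at hall
      have := (pv_all_iff_countP l w).mp hall
      omega
  exact hwB (heq ▸ hwA)
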